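-- pv_equiv track=rewrite | github.com/miosync-masa/BinaryConvolutionTheory | src/core/binary_utils.py | get_factorizations
-- ===== SOURCE A (Python) =====
-- from typing import List, Set, Tuple
--
-- def get_factorizations(n: int, include_trivial: bool = False) -> List[Tuple[int, int]]:
--     """
--     Return all factorizations of n as (a, b) with a ≤ b.
--
--     Args:
--         n: Positive integer
--         include_trivial: If True, include (1, n)
--
--     Returns:
--         List of (a, b) pairs where a * b = n and a ≤ b
--
--     Example:
--         >>> get_factorizations(12)
--         [(2, 6), (3, 4)]
--         >>> get_factorizations(12, include_trivial=True)
--         [(1, 12), (2, 6), (3, 4)]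
--     """
--     if n <= 0:
--         raise ValueError("n must be a positive integer")
--
--     factors = []
--     start = 1 if include_trivial else 2
--
--     for a in range(start, int(n**0.5) + 1):
--         if n % a == 0:
--             b = n // a
--             if a <= b and (include_trivial or b < n):
--                 factors.append((a, b))
--
--     return factors
-- ===== SOURCE B (Python) =====
-- def get_factorizations(n, include_trivial=False):
--     if n <= 0:
--         raise ValueError("n must be a positive integer")
--     divs = set()
--     for a in range(1, int(n**0.5) + 1):
--         if n % a == 0:
--             divs.add(a)
--             divs.add(n // a)
--     ds = sorted(divs)
--     half = (len(ds) + 1) // 2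
--     pairs = list(zip(ds[:half], ds[::-1]))
--     return pairs if include_trivial else pairs[1:]
-- ===== Notes on version B (the rewrite author's own statement) =====
-- stated objective: alternative
-- what changed: A filters factor pairs directly in one guarded √n loop; B collects the full divisor set (adding a and n//a per hit), sorts it, and zips the lower half with the reversed list to pair the k-th smallest with the k-th largest divisor, dropping the leading (1, n) pair when include_trivial is false.
import Mathlib
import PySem

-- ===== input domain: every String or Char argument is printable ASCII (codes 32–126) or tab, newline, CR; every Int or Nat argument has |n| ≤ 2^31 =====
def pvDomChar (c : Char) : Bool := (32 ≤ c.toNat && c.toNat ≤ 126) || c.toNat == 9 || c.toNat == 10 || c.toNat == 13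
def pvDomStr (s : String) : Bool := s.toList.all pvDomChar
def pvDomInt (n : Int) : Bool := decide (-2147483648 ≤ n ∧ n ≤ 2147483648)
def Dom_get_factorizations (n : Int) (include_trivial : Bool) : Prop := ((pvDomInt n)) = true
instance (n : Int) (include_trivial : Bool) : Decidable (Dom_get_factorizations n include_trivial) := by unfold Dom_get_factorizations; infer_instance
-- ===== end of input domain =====

-- B replaces A's single filtered √n scan by collecting the full divisor set, sorting it, and
-- zipping the lower half with the reversed list (k-th smallest with k-th largest); objective: alternative.


-- ===== PORT A =====
-- int(n**0.5) is ported as Nat.sqrt on n.toNat: exact for every n in Dom (0 ≤ n ≤ 2^31, where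
-- the double-precision square root never crosses an integer boundary).
def get_factorizations (n : Int) (include_trivial : Bool) : List (Int × Int) :=
  let start : Int := if include_trivial then 1 else 2
  (PySem.List.pyRange start (((n.toNat.sqrt : Nat) : Int) + 1) 1).foldl
    (fun factors a =>
      if PySem.Int.mod n a = 0 then
        let b := PySem.Int.floordiv n a
        if a ≤ b ∧ (include_trivial = true ∨ b < n) then factors ++ [(a, b)]
        else factors
      else factors) []

-- ===== PORT B =====
def get_factorizations_alt (n : Int) (include_trivial : Bool) : List (Int × Int) :=
  let divs : PySem.Set Int :=
    (PySem.List.pyRange 1 (((n.toNat.sqrt : Nat) : Int) + 1) 1).foldl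
      (fun s a =>
        if PySem.Int.mod n a = 0 then
          PySem.Set.add (PySem.Set.add s a) (PySem.Int.floordiv n a)
        else s)
      PySem.Set.empty
  let ds := PySem.List.sorted divs (fun x => x) false
  let half : Int := PySem.Int.floordiv ((ds.length : Int) + 1) 2
  let pairs := List.zip (PySem.List.slice ds none (some half))
                        ((PySem.List.slice? ds none none (-1)).getD [])   -- ds[::-1]
  if include_trivial then pairs else PySem.List.slice pairs (some 1) none  -- pairs[1:]

-- ===== PRECONDITION & SPEC =====
-- A raises ValueError on n ≤ 0 (and so does B): Pre_ is n ≥ 1.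
def Pre_get_factorizations (n : Int) (include_trivial : Bool) : Prop := 1 ≤ n
instance (n : Int) (include_trivial : Bool) : Decidable (Pre_get_factorizations n include_trivial) := by unfold Pre_get_factorizations; infer_instance
def pvWitness_get_factorizations : Int × Bool := (12, false)
def Spec_get_factorizations (n : Int) (include_trivial : Bool) (out : List (Int × Int)) : Prop := out = get_factorizations_alt n include_trivial
instance (n : Int) (include_trivial : Bool) (out : List (Int × Int)) : Decidable (Spec_get_factorizations n include_trivial out) := by unfold Spec_get_factorizations; infer_instance

-- ===== CLAIM (what is proved, stated in full; the proofs are below) =====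
def Claim_equal_get_factorizations : Prop := ∀ (n : Int) (include_trivial : Bool), Dom_get_factorizations n include_trivial → Pre_get_factorizations n include_trivial → Spec_get_factorizations n include_trivial (get_factorizations n include_trivial)

-- ===== LEMMAS AND PROOFS =====

-- the integer sqrt bound used by both loops
def pvSq (n : Int) : Int := ((n.toNat.sqrt : Nat) : Int)
-- the ascending small divisors (a ≤ √n), as A's loop filters them
def pvSmalls (n : Int) : List Int :=
  (PySem.List.pyRange 1 (pvSq n + 1) 1).filter (fun a => decide (PySem.Int.mod n a = 0))
-- the small divisors whose cofactor is strictly larger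
def pvSmalls' (n : Int) : List Int :=
  (pvSmalls n).filter (fun a => decide (a * a ≠ n))
-- the large divisors (> √n), ascending
def pvBigs (n : Int) : List Int :=
  ((pvSmalls' n).map (fun a => PySem.Int.floordiv n a)).reverse
-- canonical sorted divisor list
def pvDs (n : Int) : List Int := pvSmalls n ++ pvBigs n
-- the common canonical result: (a, n // a) over the small divisors
def pvC (n : Int) : List (Int × Int) :=
  (pvSmalls n).map (fun a => (a, PySem.Int.floordiv n a))

theorem pvSq_nonneg (n : Int) : 0 ≤ pvSq n := Int.natCast_nonneg _

theorem pv_le_sq_iff (n : Int) (hn : 1 ≤ n) (a : Int) (ha : 0 ≤ a) :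
    a ≤ pvSq n ↔ a * a ≤ n := by
  rcases Int.eq_ofNat_of_zero_le ha with ⟨m, rfl⟩
  rcases Int.eq_ofNat_of_zero_le (show (0:Int) ≤ n by omega) with ⟨N, rfl⟩
  simp only [pvSq, Int.toNat_natCast, Nat.cast_le]
  rw [Nat.le_sqrt]
  constructor <;> intro h <;> exact_mod_cast h

theorem pvSq_pos (n : Int) (hn : 1 ≤ n) : 1 ≤ pvSq n := by
  have := (pv_le_sq_iff n hn 1 (by omega)).mpr (by omega)
  omega

theorem pvSq_sq_le (n : Int) (hn : 1 ≤ n) : pvSq n * pvSq n ≤ n :=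
  (pv_le_sq_iff n hn (pvSq n) (pvSq_nonneg n)).mp le_rfl

-- basic cofactor facts
theorem pv_fd_mul (n a : Int) (hd : a ∣ n) :
    PySem.Int.floordiv n a * a = n := by
  have h := PySem.Int.floordiv_mul_add_mod n a
  rw [(PySem.Int.mod_eq_zero_iff_dvd n a).mpr hd] at h
  omega

theorem pv_fd_pos (n a : Int) (hn : 1 ≤ n) (ha : 1 ≤ a) (hd : a ∣ n) :
    1 ≤ PySem.Int.floordiv n a :=
  (PySem.Int.le_floordiv_iff_mul_le (by omega)).mpr
    (by simpa using Int.le_of_dvd (by omega) hd)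

theorem pv_fd_dvd (n a : Int) (hd : a ∣ n) : PySem.Int.floordiv n a ∣ n :=
  ⟨a, (pv_fd_mul n a hd).symm⟩

theorem pv_fd_invol (n a : Int) (hn : 1 ≤ n) (ha : 1 ≤ a) (hd : a ∣ n) :
    PySem.Int.floordiv n (PySem.Int.floordiv n a) = a := by
  have hpos := pv_fd_pos n a hn ha hd
  have hmul := pv_fd_mul n a hd
  rw [PySem.Int.floordiv_eq_iff_of_pos (by omega)]
  constructor
  · nlinarith
  · nlinarith

theorem pv_mem_smalls (n a : Int) :
    a ∈ pvSmalls n ↔ 1 ≤ a ∧ a ≤ pvSq n ∧ a ∣ n := by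
  simp [pvSmalls, PySem.List.mem_pyRange_one, List.mem_filter,
        PySem.Int.mod_eq_zero_iff_dvd]
  omega

theorem pv_smalls_pairwise (n : Int) : (pvSmalls n).Pairwise (· < ·) :=
  (PySem.List.pairwise_lt_pyRange_one 1 (pvSq n + 1)).filter _

-- a ≤ n // a for small divisors
theorem pv_a_le_fd (n a : Int) (hn : 1 ≤ n) (ha : 1 ≤ a) (hsq : a ≤ pvSq n) :
    a ≤ PySem.Int.floordiv n a :=
  (PySem.Int.le_floordiv_iff_mul_le (by omega)).mpr
    ((pv_le_sq_iff n hn a (by omega)).mp hsq)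

-- n // a < n for a ≥ 2
theorem pv_fd_lt_n (n a : Int) (hn : 1 ≤ n) (ha : 2 ≤ a) :
    PySem.Int.floordiv n a < n :=
  (PySem.Int.floordiv_lt_iff_lt_mul (by omega)).mpr (by nlinarith)

theorem pvA_eq (n : Int) (t : Bool) (hn : 1 ≤ n) :
    get_factorizations n t = if t then pvC n else (pvC n).drop 1 := by
  cases t
  · -- include_trivial = false : loop from 2, guard b < n always true there
    simp only [get_factorizations, Bool.false_eq_true]
    have hcongr : ∀ (acc : List (Int × Int)),
        ∀ x ∈ PySem.List.pyRange 2 (pvSq n + 1) 1,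
        (fun factors a =>
          if PySem.Int.mod n a = 0 then
            if a ≤ PySem.Int.floordiv n a ∧ (False ∨ PySem.Int.floordiv n a < n) then
              factors ++ [(a, PySem.Int.floordiv n a)]
            else factors
          else factors) acc x =
        (fun factors a =>
          if (decide (PySem.Int.mod n a = 0) : Bool) = true then
            factors ++ [(a, PySem.Int.floordiv n a)] else factors) acc x := by
      intro acc x hx
      rw [PySem.List.mem_pyRange_one] at hx
      by_cases hm : PySem.Int.mod n x = 0
      · have hd : x ∣ n := (PySem.Int.mod_eq_zero_iff_dvd n x).mp hm
        simp only [hm, if_pos, decide_eq_true_eq]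
        rw [if_pos ⟨pv_a_le_fd n x hn (by omega) (by omega),
                    Or.inr (pv_fd_lt_n n x hn (by omega))⟩]
      · simp [hm]
    rw [show ((n.toNat.sqrt : Nat) : Int) = pvSq n from rfl,
        show (if False then (1:Int) else 2) = 2 by simp,
        PySem.List.foldl_congr_mem _ _ _ _ hcongr, PySem.List.foldl_append_if]
    have h1 : (1:Int) < pvSq n + 1 := by have := pvSq_pos n hn; omega
    rw [show pvC n = ((PySem.List.pyRange 1 (pvSq n + 1) 1).filter
          (fun a => decide (PySem.Int.mod n a = 0))).map
          (fun a => (a, PySem.Int.floordiv n a)) from rfl,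
        PySem.List.pyRange_one_cons h1]
    rw [List.filter_cons_of_pos (by simp)]
    simp
  · -- include_trivial = true : loop from 1, guard trivially true
    simp only [get_factorizations]
    have hcongr : ∀ (acc : List (Int × Int)),
        ∀ x ∈ PySem.List.pyRange 1 (pvSq n + 1) 1,
        (fun factors a =>
          if PySem.Int.mod n a = 0 then
            if a ≤ PySem.Int.floordiv n a ∧ (True ∨ PySem.Int.floordiv n a < n) then
              factors ++ [(a, PySem.Int.floordiv n a)]
            else factors
          else factors) acc x =
        (fun factors a =>
          if (decide (PySem.Int.mod n a = 0) : Bool) = true then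
            factors ++ [(a, PySem.Int.floordiv n a)] else factors) acc x := by
      intro acc x hx
      rw [PySem.List.mem_pyRange_one] at hx
      by_cases hm : PySem.Int.mod n x = 0
      · simp only [hm, if_pos, decide_eq_true_eq]
        rw [if_pos ⟨pv_a_le_fd n x hn (by omega) (by omega), Or.inl trivial⟩]
      · simp [hm]
    rw [show ((n.toNat.sqrt : Nat) : Int) = pvSq n from rfl,
        show (if True then (1:Int) else 2) = 1 by simp,
        PySem.List.foldl_congr_mem _ _ _ _ hcongr, PySem.List.foldl_append_if]
    simp [pvC, pvSmalls]

-- the divisor-set fold of port B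
theorem pv_mem_fold (n : Int) (l : List Int) (s0 : PySem.Set Int) (x : Int) :
    x ∈ l.foldl (fun s a => if PySem.Int.mod n a = 0 then
        PySem.Set.add (PySem.Set.add s a) (PySem.Int.floordiv n a) else s) s0 ↔
      x ∈ s0 ∨ ∃ a ∈ l, PySem.Int.mod n a = 0 ∧ (x = a ∨ x = PySem.Int.floordiv n a) := by
  induction l generalizing s0 with
  | nil => simp
  | cons a l ih =>
    rw [List.foldl_cons, ih]
    by_cases hm : PySem.Int.mod n a = 0
    · simp only [hm, if_pos]
      simp [PySem.Set.mem_add]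
      aesop
    · simp [hm]

theorem pv_nodup_fold (n : Int) (l : List Int) (s0 : PySem.Set Int) (h : s0.Nodup) :
    (l.foldl (fun s a => if PySem.Int.mod n a = 0 then
        PySem.Set.add (PySem.Set.add s a) (PySem.Int.floordiv n a) else s) s0).Nodup := by
  induction l generalizing s0 with
  | nil => exact h
  | cons a l ih =>
    rw [List.foldl_cons]
    by_cases hm : PySem.Int.mod n a = 0
    · simp only [hm, if_pos]
      exact ih _ (PySem.Set.nodup_add _ _ (PySem.Set.nodup_add _ _ h))
    · simp only [hm, ite_false]
      exact ih _ h

-- membership in the fold = positive divisors of n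
theorem pv_mem_divs (n : Int) (hn : 1 ≤ n) (x : Int) :
    x ∈ (PySem.List.pyRange 1 (pvSq n + 1) 1).foldl (fun s a => if PySem.Int.mod n a = 0 then
        PySem.Set.add (PySem.Set.add s a) (PySem.Int.floordiv n a) else s) PySem.Set.empty ↔
      x ∣ n ∧ 1 ≤ x := by
  rw [pv_mem_fold]
  constructor
  · rintro (h | ⟨a, ha, hm, rfl | rfl⟩)
    · simp [PySem.Set.empty] at h
    · rw [PySem.List.mem_pyRange_one] at ha
      exact ⟨(PySem.Int.mod_eq_zero_iff_dvd n x).mp hm, by omega⟩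
    · rw [PySem.List.mem_pyRange_one] at ha
      have hd := (PySem.Int.mod_eq_zero_iff_dvd n a).mp hm
      exact ⟨pv_fd_dvd n a hd, pv_fd_pos n a hn (by omega) hd⟩
  · rintro ⟨hd, hx⟩
    refine Or.inr ?_
    by_cases hle : x ≤ pvSq n
    · exact ⟨x, by rw [PySem.List.mem_pyRange_one]; omega,
        (PySem.Int.mod_eq_zero_iff_dvd n x).mpr hd, Or.inl rfl⟩
    · -- x is a large divisor: its cofactor a = n // x is ≤ √n and x = n // a
      set a := PySem.Int.floordiv n x with hA
      have hmul : a * x = n := pv_fd_mul n x hd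
      have hapos : 1 ≤ a := pv_fd_pos n x hn (by omega) hd
      have hxx : n < x * x := by
        have := (pv_le_sq_iff n hn x (by omega)).not.mp hle
        omega
      have hax : a ≤ x := by nlinarith
      have hasq : a ≤ pvSq n := (pv_le_sq_iff n hn a (by omega)).mpr (by nlinarith)
      exact ⟨a, by rw [PySem.List.mem_pyRange_one]; omega,
        (PySem.Int.mod_eq_zero_iff_dvd n a).mpr (pv_fd_dvd n x hd),
        Or.inr (by rw [hA, pv_fd_invol n x hn (by omega) hd])⟩

-- membership in the canonical list = positive divisors of n
theorem pv_mem_ds (n : Int) (hn : 1 ≤ n) (x : Int) :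
    x ∈ pvDs n ↔ x ∣ n ∧ 1 ≤ x := by
  simp only [pvDs, pvBigs, List.mem_append, List.mem_reverse, List.mem_map]
  constructor
  · rintro (h | ⟨a, ha, rfl⟩)
    · rw [pv_mem_smalls] at h
      exact ⟨h.2.2, h.1⟩
    · rw [pvSmalls', List.mem_filter, pv_mem_smalls] at ha
      obtain ⟨⟨h1, _, hd⟩, _⟩ := ha
      exact ⟨pv_fd_dvd n a hd, pv_fd_pos n a hn h1 hd⟩
  · rintro ⟨hd, hx⟩
    by_cases hle : x ≤ pvSq n
    · exact Or.inl ((pv_mem_smalls n x).mpr ⟨hx, hle, hd⟩)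
    · refine Or.inr ⟨PySem.Int.floordiv n x, ?_, ?_⟩
      · set a := PySem.Int.floordiv n x with hA
        have hmul : a * x = n := pv_fd_mul n x hd
        have hapos : 1 ≤ a := pv_fd_pos n x hn (by omega) hd
        have hxx : n < x * x := by
          have := (pv_le_sq_iff n hn x (by omega)).not.mp hle
          omega
        have hax : a ≤ x := by nlinarith
        rw [pvSmalls', List.mem_filter, pv_mem_smalls]
        refine ⟨⟨hapos, (pv_le_sq_iff n hn a (by omega)).mpr (by nlinarith),
          pv_fd_dvd n x hd⟩, ?_⟩
        simp only [decide_eq_true_eq]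
        intro haa
        have hxa : x = a := by nlinarith
        rw [hxa] at hxx
        omega
      · rw [pv_fd_invol n x hn (by omega) hd]

-- the canonical list is strictly increasing
theorem pv_ds_pairwise (n : Int) (hn : 1 ≤ n) : (pvDs n).Pairwise (· < ·) := by
  rw [pvDs, List.pairwise_append]
  refine ⟨pv_smalls_pairwise n, ?_, ?_⟩
  · rw [pvBigs, List.pairwise_reverse, List.pairwise_map]
    refine ((pv_smalls_pairwise n).filter _).imp_of_mem ?_
    intro a b ha hb hab
    rw [← pvSmalls', pvSmalls', List.mem_filter, pv_mem_smalls] at ha hb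
    obtain ⟨⟨ha1, _, had⟩, _⟩ := ha
    obtain ⟨⟨hb1, _, hbd⟩, _⟩ := hb
    have hma : PySem.Int.floordiv n a * a = n := pv_fd_mul n a had
    have hmb : PySem.Int.floordiv n b * b = n := pv_fd_mul n b hbd
    have hpa : 1 ≤ PySem.Int.floordiv n a := pv_fd_pos n a hn ha1 had
    have hpb : 1 ≤ PySem.Int.floordiv n b := pv_fd_pos n b hn hb1 hbd
    nlinarith
  · intro x hx y hy
    rw [pv_mem_smalls] at hx
    rw [pvBigs, List.mem_reverse, List.mem_map] at hy
    obtain ⟨a, ha, rfl⟩ := hy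
    rw [pvSmalls', List.mem_filter, pv_mem_smalls] at ha
    obtain ⟨⟨ha1, hasq, had⟩, hne⟩ := ha
    simp only [decide_eq_true_eq] at hne
    have hma : PySem.Int.floordiv n a * a = n := pv_fd_mul n a had
    have hpa : 1 ≤ PySem.Int.floordiv n a := pv_fd_pos n a hn ha1 had
    have haa : a * a < n := by
      have := (pv_le_sq_iff n hn a (by omega)).mp hasq
      rcases lt_or_eq_of_le this with h | h
      · exact h
      · exact absurd h hne
    have hgt : a < PySem.Int.floordiv n a := by nlinarith
    have hsq2 : pvSq n * pvSq n ≤ n := pvSq_sq_le n hn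
    have hlt : pvSq n < PySem.Int.floordiv n a := by nlinarith
    have hxle := hx.2.1
    omega

-- sorting B's divisor set yields the canonical list
theorem pv_sorted_eq (n : Int) (hn : 1 ≤ n) :
    PySem.List.sorted ((PySem.List.pyRange 1 (pvSq n + 1) 1).foldl
        (fun s a => if PySem.Int.mod n a = 0 then
          PySem.Set.add (PySem.Set.add s a) (PySem.Int.floordiv n a) else s)
        PySem.Set.empty) (fun x => x) = pvDs n := by
  apply PySem.List.sorted_eq_of_perm_of_pairwise_lt
  · rw [List.perm_ext_iff_of_nodup
      ((pv_ds_pairwise n hn).imp (fun h => ne_of_lt h))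
      (pv_nodup_fold n _ PySem.Set.empty List.nodup_nil)]
    intro x
    rw [pv_mem_ds n hn, pv_mem_divs n hn]
  · exact pv_ds_pairwise n hn

-- splitting off the square root when n is a perfect square
theorem pv_filter_ne_last (l : List Int) (s : Int) (h : l.Pairwise (· < ·))
    (hb : ∀ x ∈ l, x ≤ s) (hm : s ∈ l) :
    l = l.filter (fun x => decide (x ≠ s)) ++ [s] := by
  induction l with
  | nil => cases hm
  | cons x xs ih =>
    rcases List.mem_cons.mp hm with rfl | hmem
    · have hnil : xs = [] := by
        rw [List.eq_nil_iff_forall_not_mem]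
        intro y hy
        have h1 := (List.pairwise_cons.mp h).1 y hy
        have h2 := hb y (List.mem_cons_of_mem _ hy)
        omega
      subst hnil
      simp
    · have hx : x ≠ s := by
        have h1 : ∀ y ∈ xs, x < y := (List.pairwise_cons.mp h).1
        have := h1 s hmem
        omega
      rw [List.filter_cons_of_pos (by simp [hx])]
      rw [List.cons_append, ← ih (List.pairwise_cons.mp h).2
        (fun y hy => hb y (List.mem_cons_of_mem _ hy)) hmem]

theorem pv_smalls_split_sq (n : Int) (hn : 1 ≤ n) (hsq : pvSq n * pvSq n = n) :
    pvSmalls n = pvSmalls' n ++ [pvSq n] := by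
  have hpred : ∀ a ∈ pvSmalls n,
      (decide (a * a ≠ n) : Bool) = decide (a ≠ pvSq n) := by
    intro a ha
    rw [pv_mem_smalls] at ha
    obtain ⟨h1, h2, _⟩ := ha
    simp only [decide_eq_decide]
    constructor
    · intro hne heq
      subst heq
      exact hne hsq
    · intro hne heq
      have hs0 := pvSq_nonneg n
      have : a = pvSq n := by nlinarith
      exact hne this
  rw [pvSmalls', List.filter_congr hpred]
  exact pv_filter_ne_last _ _ (pv_smalls_pairwise n)
    (fun x hx => ((pv_mem_smalls n x).mp hx).2.1)
    ((pv_mem_smalls n (pvSq n)).mpr ⟨pvSq_pos n hn, le_rfl, ⟨pvSq n, hsq.symm⟩⟩)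

theorem pv_smalls_split_nsq (n : Int) (hn : 1 ≤ n) (hsq : pvSq n * pvSq n ≠ n) :
    pvSmalls' n = pvSmalls n := by
  rw [pvSmalls', List.filter_eq_self]
  intro a ha
  rw [pv_mem_smalls] at ha
  obtain ⟨h1, h2, _⟩ := ha
  simp only [decide_eq_true_eq]
  intro haa
  have h3 := pvSq_sq_le n hn
  have : a = pvSq n := by nlinarith
  exact hsq (this ▸ haa)

-- (m + 1) // 2 over the canonical list is the small-divisor count
theorem pv_half_eq (n : Int) (hn : 1 ≤ n) :
    PySem.Int.floordiv (((pvDs n).length : Int) + 1) 2 = ((pvSmalls n).length : Int) := by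
  have hlen : (pvDs n).length = (pvSmalls n).length + (pvSmalls' n).length := by
    simp [pvDs, pvBigs]
  by_cases hsq : pvSq n * pvSq n = n
  · have := pv_smalls_split_sq n hn hsq
    have hl : (pvSmalls n).length = (pvSmalls' n).length + 1 := by
      rw [this]; simp
    rw [PySem.Int.floordiv_eq_iff_of_pos (by omega)]
    constructor <;> push_cast [hlen, hl] <;> omega
  · have hl := pv_smalls_split_nsq n hn hsq
    rw [PySem.Int.floordiv_eq_iff_of_pos (by omega)]
    constructor <;> push_cast [hlen, ← hl] <;> omega

-- the zipped pairs are exactly the canonical result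
theorem pv_pairs_eq (n : Int) (hn : 1 ≤ n) :
    List.zip ((pvDs n).take (pvSmalls n).length) (pvDs n).reverse = pvC n := by
  have hrev : (pvDs n).reverse =
      (pvSmalls' n).map (fun a => PySem.Int.floordiv n a) ++ (pvSmalls n).reverse := by
    simp [pvDs, pvBigs]
  rw [show (pvDs n).take (pvSmalls n).length = pvSmalls n by
    rw [pvDs]; exact List.take_left, hrev]
  by_cases hsq : pvSq n * pvSq n = n
  · have hsplit := pv_smalls_split_sq n hn hsq
    have hfd : PySem.Int.floordiv n (pvSq n) = pvSq n := by
      rw [PySem.Int.floordiv_eq_iff_of_pos (by have := pvSq_pos n hn; omega)]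
      constructor <;> nlinarith [pvSq_pos n hn]
    rw [pvC, hsplit]
    rw [List.zip_append (by simp)]
    rw [show (pvSmalls' n ++ [pvSq n]).reverse = pvSq n :: (pvSmalls' n).reverse by simp]
    simp only [List.zip_cons_cons, List.zip_nil_left, List.map_append, List.map_cons,
      List.map_nil, hfd]
    rw [← List.map_prod_left_eq_zip]
  · have hsplit := pv_smalls_split_nsq n hn hsq
    rw [pvC, ← hsplit, show pvSmalls' n = pvSmalls' n ++ [] by simp]
    rw [List.zip_append (by simp)]
    simp only [List.zip_nil_left, List.append_nil]
    rw [← List.map_prod_left_eq_zip]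

theorem pvB_eq (n : Int) (t : Bool) (hn : 1 ≤ n) :
    get_factorizations_alt n t = if t then pvC n else (pvC n).drop 1 := by
  have hsq : ((n.toNat.sqrt : Nat) : Int) = pvSq n := rfl
  simp only [get_factorizations_alt, hsq, pv_sorted_eq n hn,
    PySem.List.slice?_none_none_neg_one, Option.getD_some]
  rw [pv_half_eq n hn,
    PySem.List.slice_to _ (by positivity),
    Int.toNat_natCast, pv_pairs_eq n hn]
  cases t
  · simp [PySem.List.slice_from_one, List.drop_one]
  · simp

-- ===== VERDICT (by name: the statement is the Claim_ definition above) =====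
theorem get_factorizations_spec : Claim_equal_get_factorizations := by
  intro n t _ hpre
  unfold Spec_get_factorizations
  rw [pvA_eq n t hpre, pvB_eq n t hpre]
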